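-- pv_equiv track=rewrite | github.com/nvamsi2015/elementary-DS | BS/all.py | min_cooldown_time
-- ===== SOURCE A (Python) =====
-- INT_MAX = 2 ** 31 - 1
--
-- def upgrade_possible(cooldown, mid, n, m, k):
--     upgrades = 0
--     antique = 0
--     flag = 0
--     for i in range(n):
--         if cooldown[i] <= mid:
--             antique += 1
--         else:
--             antique = 0
--         if antique == k:
--             upgrades += 1
--             antique = 0
--
--     if upgrades >= m:
--         flag = 1
--     return flag
--
-- def min_cooldown_time(cooldown, n, m, k):
--     if m * k > n:
--         return -1
--
--     start = 0
--     end = INT_MAX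
--     while start < end:
--         mid = start + (end - start) // 2
--         if upgrade_possible(cooldown, mid, n, m, k):
--             end = mid
--         else:
--             start = mid + 1
--
--     return end
-- ===== SOURCE B (Python) =====
-- def min_cooldown_time(cooldown, n, m, k):
--     """Earliest nonnegative time t at which the first n items contain at least
--     m disjoint groups of k consecutive ready items (item i is ready at time t
--     iff cooldown[i] <= t); -1 if n items can never hold m groups of k."""
--     if m * k > n:
--         return -1
--
--     def ready_groups(t):
--         groups = 0
--         run = 0
--         for i in range(n):
--             if cooldown[i] <= t:
--                 run += 1
--             else:
--                 groups += run // k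
--                 run = 0
--         return groups + run // k
--
--     if ready_groups(0) >= m:
--         return 0
--     for t in sorted({cooldown[i] for i in range(n) if cooldown[i] > 0}):
--         if ready_groups(t) >= m:
--             return t
-- ===== Notes on version B (the rewrite author's own statement) =====
-- stated objective: alternative
-- what changed: B replaces A's binary search over [0, 2^31-1] (each probe rescanning the array with a reset-at-k counter) by an event sweep over the moments the ready-set changes: it checks time 0, then the sorted distinct positive cooldown values, returning the first time with at least m k-groups, feasibility computed as the sum of floor(run_length/k) over maximal runs; Pre_ keeps the early -1 guard case and otherwise excludes k <= 0 (outside the natural domain of a group size; …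
-- outside the precondition, e.g. on min_cooldown_time([2147483648], 1, 1, 1): A returns 2147483647, B returns 2147483648; on min_cooldown_time([0], 1, 0, -1): A returns 0, B returns None; on min_cooldown_time([1, 2], 2, 1, 0): A returns 2147483647, B raises ZeroDivisionError
import Mathlib
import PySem

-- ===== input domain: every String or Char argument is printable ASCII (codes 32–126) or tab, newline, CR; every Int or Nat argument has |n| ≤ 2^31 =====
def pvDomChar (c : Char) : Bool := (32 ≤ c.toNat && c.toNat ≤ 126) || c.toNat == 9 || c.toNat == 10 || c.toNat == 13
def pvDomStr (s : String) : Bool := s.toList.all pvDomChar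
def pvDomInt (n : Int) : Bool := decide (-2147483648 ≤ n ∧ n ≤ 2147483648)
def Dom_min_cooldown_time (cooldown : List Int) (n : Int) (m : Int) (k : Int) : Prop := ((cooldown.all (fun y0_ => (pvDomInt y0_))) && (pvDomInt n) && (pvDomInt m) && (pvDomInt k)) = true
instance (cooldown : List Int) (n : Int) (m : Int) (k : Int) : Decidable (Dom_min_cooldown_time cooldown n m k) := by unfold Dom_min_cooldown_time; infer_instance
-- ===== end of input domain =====

-- B replaces A's binary search over [0, 2^31-1] by an event sweep: it checks time 0 and then
-- the sorted distinct positive cooldown values, returning the first time with ≥ m k-groups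
-- (alternative algorithm, similar cost; proved equal on Pre_).

-- ===== PORT A =====
def INT_MAX : Int := 2 ^ 31 - 1

-- one step of upgrade_possible's loop body (state = (upgrades, antique))
def upStepA (mid k : Int) (s : Int × Int) (v : Int) : Int × Int :=
  let antique := if v ≤ mid then s.2 + 1 else 0
  if antique = k then (s.1 + 1, 0) else (s.1, antique)

def upgrade_possible (cooldown : List Int) (mid : Int) (n : Int) (m : Int) (k : Int) : Int :=
  let st := (PySem.List.pyRange 0 n 1).foldl
      (fun s i => upStepA mid k s (PySem.List.pyGetD cooldown i 0)) ((0 : Int), (0 : Int))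
  if st.1 ≥ m then 1 else 0

-- the while loop of min_cooldown_time (state = (start, end))
def bs_loop (cooldown : List Int) (n m k start stop : Int) : Int :=
  if start < stop then
    let mid := start + PySem.Int.floordiv (stop - start) 2
    if upgrade_possible cooldown mid n m k ≠ 0 then
      bs_loop cooldown n m k start mid
    else
      bs_loop cooldown n m k (mid + 1) stop
  else stop
termination_by (stop - start).toNat
decreasing_by
  all_goals
    have h2 : PySem.Int.floordiv (stop - start) 2 = (stop - start) / 2 :=
      PySem.Int.floordiv_eq_ediv_of_pos (by omega)
    omega

def min_cooldown_time (cooldown : List Int) (n : Int) (m : Int) (k : Int) : Int :=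
  if m * k > n then -1 else bs_loop cooldown n m k 0 INT_MAX

-- ===== PORT B =====
-- one step of ready_groups' loop body (state = (groups, run))
def upStepB (t k : Int) (s : Int × Int) (v : Int) : Int × Int :=
  if v ≤ t then (s.1, s.2 + 1) else (s.1 + PySem.Int.floordiv s.2 k, 0)

def ready_groups (cooldown : List Int) (n : Int) (t : Int) (k : Int) : Int :=
  let st := (PySem.List.pyRange 0 n 1).foldl
      (fun s i => upStepB t k s (PySem.List.pyGetD cooldown i 0)) ((0 : Int), (0 : Int))
  st.1 + PySem.Int.floordiv st.2 k

-- B's for-loop over the sorted event times; [] = Python's fall-through (unreachable under Pre_)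
def scanB (cooldown : List Int) (n m k : Int) : List Int → Int
  | [] => 0
  | t :: rest => if ready_groups cooldown n t k ≥ m then t else scanB cooldown n m k rest

def min_cooldown_time_alt (cooldown : List Int) (n : Int) (m : Int) (k : Int) : Int :=
  if m * k > n then -1
  else if ready_groups cooldown n 0 k ≥ m then 0
  else
    scanB cooldown n m k
      (PySem.List.sorted
        (PySem.Set.ofList
          (((PySem.List.pyRange 0 n 1).map (fun i => PySem.List.pyGetD cooldown i 0)).filter
            (fun v => decide (0 < v))))
        (fun x => x) false)

-- ===== PRECONDITION & SPEC =====
-- Pre_ keeps the whole early-guard case (m*k > n, both return -1) and otherwise excludes: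
-- k ≤ 0, outside the natural domain of a group size (A's degenerate counter vs B's division
-- by k); n > len(cooldown), where A raises IndexError; and prefix values above 2^31-1,
-- beyond A's fixed 32-bit search range, where A returns its exhausted upper bound.
def Pre_min_cooldown_time (cooldown : List Int) (n : Int) (m : Int) (k : Int) : Prop :=
  m * k > n ∨
    (1 ≤ k ∧ n ≤ (cooldown.length : Int) ∧ ∀ v ∈ cooldown.take n.toNat, v ≤ 2 ^ 31 - 1)
instance (cooldown : List Int) (n : Int) (m : Int) (k : Int) : Decidable (Pre_min_cooldown_time cooldown n m k) := by unfold Pre_min_cooldown_time; infer_instance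

def pvWitness_min_cooldown_time : List Int × Int × Int × Int := ([5, 2, 3], 3, 1, 2)

def Spec_min_cooldown_time (cooldown : List Int) (n : Int) (m : Int) (k : Int) (out : Int) : Prop := out = min_cooldown_time_alt cooldown n m k
instance (cooldown : List Int) (n : Int) (m : Int) (k : Int) (out : Int) : Decidable (Spec_min_cooldown_time cooldown n m k out) := by unfold Spec_min_cooldown_time; infer_instance

-- ===== CLAIM (what is proved, stated in full; the proofs are below) =====
def Claim_equal_min_cooldown_time : Prop := ∀ (cooldown : List Int) (n : Int) (m : Int) (k : Int), Dom_min_cooldown_time cooldown n m k → Pre_min_cooldown_time cooldown n m k → Spec_min_cooldown_time cooldown n m k (min_cooldown_time cooldown n m k)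

-- ===== LEMMAS AND PROOFS =====

-- A's upgrade count over a plain list
def pvUpA (L : List Int) (k t : Int) : Int := (L.foldl (upStepA t k) ((0 : Int), (0 : Int))).1

-- B's group count over a plain list
def pvUpB (L : List Int) (t k : Int) : Int :=
  let st := L.foldl (upStepB t k) ((0 : Int), (0 : Int))
  st.1 + PySem.Int.floordiv st.2 k

-- indexing by range(n) is the prefix of length n
theorem map_range_take (cooldown : List Int) (n : Int) (hn : n ≤ (cooldown.length : Int)) :
    (PySem.List.pyRange 0 n 1).map (fun i => PySem.List.pyGetD cooldown i 0)
      = cooldown.take n.toNat := by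
  by_cases hpos : 0 < n
  · set L := cooldown.take n.toNat with hLdef
    have hlen : L.length = n.toNat := by simp [hLdef]; omega
    have hLlen : (L.length : Int) = n := by rw [hlen]; omega
    have hcongr : (PySem.List.pyRange 0 n 1).map (fun i => PySem.List.pyGetD cooldown i 0)
        = (PySem.List.pyRange 0 n 1).map (fun i => PySem.List.pyGetD L i 0) := by
      apply List.map_congr_left
      intro x hx
      have hx' := (PySem.List.mem_pyRange_one).1 hx
      have hx0 : 0 ≤ x := hx'.1
      have hxn : x < n := hx'.2
      have h1 : PySem.List.pyGetD cooldown x 0 = cooldown[x.toNat] :=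
        PySem.List.pyGetD_eq_getElem cooldown 0 hx0 (by omega)
      have h2 : PySem.List.pyGetD L x 0 = L[x.toNat]'(by omega) :=
        PySem.List.pyGetD_eq_getElem L 0 hx0 (by omega)
      have h3 : L[x.toNat]'(by omega) = cooldown[x.toNat]'(by omega) := by
        simp [hLdef]
      rw [h1, h2, h3]
    rw [hcongr, ← hLlen]
    exact PySem.List.map_pyGetD_pyRange_zero' L 0
  · have h1 : PySem.List.pyRange 0 n 1 = [] := PySem.List.pyRange_one_eq_nil (by omega)
    have h2 : n.toNat = 0 := by omega
    simp [h1, h2]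

-- any fold over range(n) with indexing is a fold over the prefix
theorem fold_range_take {β : Type} (f : β → Int → β) (cooldown : List Int) (n : Int)
    (init : β) (hn : n ≤ (cooldown.length : Int)) :
    (PySem.List.pyRange 0 n 1).foldl (fun s i => f s (PySem.List.pyGetD cooldown i 0)) init
      = (cooldown.take n.toNat).foldl f init := by
  rw [← map_range_take cooldown n hn, List.foldl_map]

theorem upgrade_possible_eq (cooldown : List Int) (t n m k : Int)
    (hn : n ≤ (cooldown.length : Int)) :
    upgrade_possible cooldown t n m k
      = if pvUpA (cooldown.take n.toNat) k t ≥ m then 1 else 0 := by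
  unfold upgrade_possible pvUpA
  rw [fold_range_take (upStepA t k) cooldown n _ hn]

-- A's reset-at-k counter equals B's run/total accounting
theorem relAB_aux (t k : Int) (hk : 0 < k) :
    ∀ (L : List Int) (tot run : Int), 0 ≤ run →
      L.foldl (upStepA t k) (tot + run / k, run % k) =
        ((L.foldl (upStepB t k) (tot, run)).1 + (L.foldl (upStepB t k) (tot, run)).2 / k,
         (L.foldl (upStepB t k) (tot, run)).2 % k)
      ∧ 0 ≤ (L.foldl (upStepB t k) (tot, run)).2 := by
  intro L
  induction L with
  | nil => intro tot run hrun; exact ⟨rfl, hrun⟩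
  | cons v rest ih =>
    intro tot run hrun
    have hs : 0 ≤ run % k := Int.emod_nonneg run (by omega)
    have hs' : run % k < k := Int.emod_lt_of_pos run hk
    have hdm : k * (run / k) + run % k = run := Int.mul_ediv_add_emod run k
    by_cases hv : v ≤ t
    · have hB : upStepB t k (tot, run) v = (tot, run + 1) := by
        simp [upStepB, hv]
      by_cases hfull : run % k + 1 = k
      · have hq : (run + 1) / k = run / k + 1 := by
          have : run + 1 = k * (run / k + 1) := by ring_nf; omega
          rw [this, Int.mul_ediv_cancel_left _ (by omega : k ≠ 0)]
        have hr : (run + 1) % k = 0 := by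
          have : run + 1 = k * (run / k + 1) := by ring_nf; omega
          rw [this, Int.mul_emod_right]
        have hA : upStepA t k (tot + run / k, run % k) v = (tot + (run + 1) / k, (run + 1) % k) := by
          simp only [upStepA, hv, if_pos, hfull, hq, hr]
          simp
          omega
        simp only [List.foldl_cons, hA, hB]
        exact ih tot (run + 1) (by omega)
      · have hq : (run + 1) / k = run / k := by
          have h1 : run + 1 = (run % k + 1) + k * (run / k) := by omega
          rw [h1, Int.add_mul_ediv_left _ _ (by omega : k ≠ 0),
            Int.ediv_eq_zero_of_lt (by omega) (by omega)]
          ring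
        have hr : (run + 1) % k = run % k + 1 := by
          have h1 : run + 1 = (run % k + 1) + k * (run / k) := by omega
          rw [h1, Int.add_mul_emod_self_left, Int.emod_eq_of_lt (by omega) (by omega)]
        have hA : upStepA t k (tot + run / k, run % k) v = (tot + (run + 1) / k, (run + 1) % k) := by
          simp only [upStepA, hv, if_pos, hfull]
          simp [hq, hr]
        simp only [List.foldl_cons, hA, hB]
        exact ih tot (run + 1) (by omega)
    · have hB : upStepB t k (tot, run) v = (tot + PySem.Int.floordiv run k, 0) := by
        simp [upStepB, hv]
      have hfd : PySem.Int.floordiv run k = run / k := PySem.Int.floordiv_eq_ediv_of_pos hk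
      have hA : upStepA t k (tot + run / k, run % k) v = (tot + run / k, 0) := by
        simp [upStepA, hv]
        omega
      simp only [List.foldl_cons, hA, hB, hfd]
      have h0 : (0 : Int) / k = 0 := Int.zero_ediv k
      have h0' : (0 : Int) % k = 0 := Int.zero_emod k
      have := ih (tot + run / k) 0 (by omega)
      rw [h0, h0'] at this
      simpa using this

theorem relAB (L : List Int) (t k : Int) (hk : 0 < k) :
    pvUpB L t k = pvUpA L k t := by
  have h := relAB_aux t k hk L 0 0 (by omega)
  have h0 : (0 : Int) / k = 0 := Int.zero_ediv k
  have h0' : (0 : Int) % k = 0 := Int.zero_emod k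
  rw [h0, h0'] at h
  simp only [add_zero] at h
  unfold pvUpB pvUpA
  rw [h.1]
  simp only []
  rw [PySem.Int.floordiv_eq_ediv_of_pos hk]

-- B's ready_groups over range(n) is A's count over the prefix
theorem ready_groups_eq (cooldown : List Int) (n t k : Int)
    (hn : n ≤ (cooldown.length : Int)) (hk : 0 < k) :
    ready_groups cooldown n t k = pvUpA (cooldown.take n.toNat) k t := by
  unfold ready_groups
  rw [fold_range_take (upStepB t k) cooldown n _ hn]
  exact relAB (cooldown.take n.toNat) t k hk

-- monotonicity of A's upgrade count in the threshold
theorem monoA_aux (t t' k : Int) (hk : 0 < k) (htt' : t ≤ t') :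
    ∀ (L : List Int) (u a u' a' : Int), 0 ≤ a → a < k → 0 ≤ a' → a' < k → u ≤ u' →
      u * k + a ≤ u' * k + a' →
      (L.foldl (upStepA t k) (u, a)).1 ≤ (L.foldl (upStepA t' k) (u', a')).1 ∧
      0 ≤ (L.foldl (upStepA t k) (u, a)).2 ∧ (L.foldl (upStepA t k) (u, a)).2 < k ∧
      0 ≤ (L.foldl (upStepA t' k) (u', a')).2 ∧ (L.foldl (upStepA t' k) (u', a')).2 < k ∧
      (L.foldl (upStepA t k) (u, a)).1 * k + (L.foldl (upStepA t k) (u, a)).2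
        ≤ (L.foldl (upStepA t' k) (u', a')).1 * k + (L.foldl (upStepA t' k) (u', a')).2 := by
  intro L
  induction L with
  | nil =>
    intro u a u' a' h1 h2 h3 h4 h5 h6
    exact ⟨h5, h1, h2, h3, h4, h6⟩
  | cons v rest ih =>
    intro u a u' a' h1 h2 h3 h4 h5 h6
    simp only [List.foldl_cons]
    by_cases hv : v ≤ t
    · have hv' : v ≤ t' := le_trans hv htt'
      by_cases hfa : a + 1 = k
      · have hA : upStepA t k (u, a) v = (u + 1, 0) := by simp [upStepA, hv, hfa]
        by_cases hfa' : a' + 1 = k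
        · have hA' : upStepA t' k (u', a') v = (u' + 1, 0) := by simp [upStepA, hv', hfa']
          rw [hA, hA']
          exact ih _ _ _ _ le_rfl hk le_rfl hk (by omega) (by nlinarith)
        · have hA' : upStepA t' k (u', a') v = (u', a' + 1) := by simp [upStepA, hv', hfa']
          rw [hA, hA']
          have ha2 : a = k - 1 := by omega
          have ha'2 : a' + 1 < k := by omega
          have huu : u * k < u' * k := by nlinarith
          have hu1 : u < u' := lt_of_mul_lt_mul_right huu (by omega)
          exact ih _ _ _ _ le_rfl hk (by omega) (by omega) (by omega) (by nlinarith)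
      · have hA : upStepA t k (u, a) v = (u, a + 1) := by simp [upStepA, hv, hfa]
        by_cases hfa' : a' + 1 = k
        · have hA' : upStepA t' k (u', a') v = (u' + 1, 0) := by simp [upStepA, hv', hfa']
          rw [hA, hA']
          exact ih _ _ _ _ (by omega) (by omega) le_rfl hk (by omega) (by nlinarith)
        · have hA' : upStepA t' k (u', a') v = (u', a' + 1) := by simp [upStepA, hv', hfa']
          rw [hA, hA']
          exact ih _ _ _ _ (by omega) (by omega) (by omega) (by omega) h5 (by omega)
    · have hA : upStepA t k (u, a) v = (u, 0) := by
        simp [upStepA, hv]; omega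
      by_cases hv' : v ≤ t'
      · by_cases hfa' : a' + 1 = k
        · have hA' : upStepA t' k (u', a') v = (u' + 1, 0) := by simp [upStepA, hv', hfa']
          rw [hA, hA']
          exact ih _ _ _ _ (by omega) hk le_rfl hk (by omega) (by nlinarith)
        · have hA' : upStepA t' k (u', a') v = (u', a' + 1) := by simp [upStepA, hv', hfa']
          rw [hA, hA']
          exact ih _ _ _ _ (by omega) hk (by omega) (by omega) h5 (by nlinarith)
      · have hA' : upStepA t' k (u', a') v = (u', 0) := by
          simp [upStepA, hv']; omega
        rw [hA, hA']
        exact ih _ _ _ _ (by omega) hk (by omega) hk h5 (by nlinarith)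

theorem monoA (L : List Int) (t t' k : Int) (hk : 0 < k) (htt' : t ≤ t') :
    pvUpA L k t ≤ pvUpA L k t' := by
  exact (monoA_aux t t' k hk htt' L 0 0 0 0 le_rfl hk le_rfl hk le_rfl le_rfl).1

-- the count depends only on the comparisons v ≤ t
theorem congrA (L : List Int) (t s k : Int) (h : ∀ v ∈ L, (v ≤ t ↔ v ≤ s)) :
    pvUpA L k t = pvUpA L k s := by
  unfold pvUpA
  have : ∀ (init : Int × Int), L.foldl (upStepA t k) init = L.foldl (upStepA s k) init := by
    induction L with
    | nil => intro init; rfl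
    | cons v rest ih =>
      intro init
      have hv := h v (List.mem_cons_self ..)
      have hstep : upStepA t k init v = upStepA s k init v := by
        unfold upStepA
        by_cases hvt : v ≤ t
        · rw [if_pos hvt, if_pos (hv.1 hvt)]
        · rw [if_neg hvt, if_neg (fun hs => hvt (hv.2 hs))]
      simp only [List.foldl_cons, hstep]
      exact ih (fun v hv => h v (List.mem_cons_of_mem _ hv)) _
  rw [this]

-- when everything is ready the count is length // k
theorem foldB_all_le (t k : Int) :
    ∀ (L : List Int), (∀ v ∈ L, v ≤ t) → ∀ (tot run : Int),
      L.foldl (upStepB t k) (tot, run) = (tot, run + (L.length : Int)) := by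
  intro L
  induction L with
  | nil => intro _ tot run; simp
  | cons v rest ih =>
    intro h tot run
    have hv : v ≤ t := h v (List.mem_cons_self ..)
    have hstep : upStepB t k (tot, run) v = (tot, run + 1) := by simp [upStepB, hv]
    simp only [List.foldl_cons, hstep]
    rw [ih (fun w hw => h w (List.mem_cons_of_mem _ hw)) tot (run + 1)]
    simp only [List.length_cons]
    simp only [Prod.mk.injEq, true_and]
    push_cast
    ring

theorem pvUpA_all_le (L : List Int) (t k : Int) (hk : 0 < k) (h : ∀ v ∈ L, v ≤ t) :
    pvUpA L k t = (L.length : Int) / k := by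
  rw [← relAB L t k hk]
  unfold pvUpB
  rw [foldB_all_le t k L h 0 0]
  simp [PySem.Int.floordiv_eq_ediv_of_pos hk]

-- max of a list with floor 0
theorem le_foldr_max (L : List Int) : ∀ v ∈ L, v ≤ L.foldr max 0 := by
  induction L with
  | nil => intro v hv; cases hv
  | cons w rest ih =>
    intro v hv
    rcases List.mem_cons.1 hv with h | h
    · subst h; exact le_max_left ..
    · exact le_trans (ih v h) (le_max_right ..)

theorem foldr_max_nonneg (L : List Int) : 0 ≤ L.foldr max 0 := by
  induction L with
  | nil => simp
  | cons w rest ih => exact le_trans ih (le_max_right ..)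

theorem foldr_max_cases (L : List Int) : L.foldr max 0 = 0 ∨ L.foldr max 0 ∈ L := by
  induction L with
  | nil => left; rfl
  | cons w rest ih =>
    rcases max_choice w (rest.foldr max 0) with h | h
    · right; rw [List.foldr_cons, h]; exact List.mem_cons_self ..
    · rcases ih with h0 | hm
      · left; rw [List.foldr_cons, h, h0]
      · right; rw [List.foldr_cons, h]; exact List.mem_cons_of_mem _ hm

-- if every candidate ≤ t is infeasible, so is t itself
theorem noP_aux (L C : List Int) (m k : Int) (h0 : (0 : Int) ∈ C)
    (hCof : ∀ v ∈ L, 0 ≤ v → v ≤ INT_MAX → v ∈ C) :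
    ∀ (j : Nat), (j : Int) ≤ INT_MAX →
      (∀ c ∈ C, c ≤ (j : Int) → pvUpA L k c < m) → pvUpA L k (j : Int) < m := by
  intro j
  induction j with
  | zero =>
    intro hM h
    exact h 0 h0 le_rfl
  | succ j ih =>
    intro hM h
    by_cases hc : ((j : Int) + 1) ∈ C
    · have := h _ hc (by push_cast; omega)
      simpa using this
    · have hup : pvUpA L k ((j : Int) + 1) = pvUpA L k (j : Int) := by
        apply congrA
        intro v hv
        by_cases hveq : v = (j : Int) + 1
        · exfalso
          apply hc
          rw [← hveq]
          exact hCof v hv (by omega) (by push_cast at hM; omega)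
        · omega
      have hj := ih (by push_cast at hM ⊢; omega)
        (fun c hcC hcj => h c hcC (by push_cast; omega))
      push_cast
      omega

theorem noP (L C : List Int) (m k t : Int) (h0 : (0 : Int) ∈ C)
    (hCof : ∀ v ∈ L, 0 ≤ v → v ≤ INT_MAX → v ∈ C)
    (ht0 : 0 ≤ t) (htM : t ≤ INT_MAX)
    (h : ∀ c ∈ C, c ≤ t → pvUpA L k c < m) : pvUpA L k t < m := by
  have ht : t = ((t.toNat : Nat) : Int) := by omega
  rw [ht]
  apply noP_aux L C m k h0 hCof
  · omega
  · intro c hc hct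
    exact h c hc (by omega)

-- characterisation of the binary-search loop
theorem bs_spec (cooldown : List Int) (n m k : Int) (hn : n ≤ (cooldown.length : Int))
    (hk : 0 < k) :
    ∀ (fuel : Nat) (s e : Int), (e - s).toNat ≤ fuel → 0 ≤ s → s ≤ e → e ≤ INT_MAX →
      (∀ t, 0 ≤ t → t < s → pvUpA (cooldown.take n.toNat) k t < m) →
      (e < INT_MAX → m ≤ pvUpA (cooldown.take n.toNat) k e) →
      0 ≤ bs_loop cooldown n m k s e ∧ bs_loop cooldown n m k s e ≤ INT_MAX ∧
      (∀ t, 0 ≤ t → t < bs_loop cooldown n m k s e → pvUpA (cooldown.take n.toNat) k t < m) ∧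
      (bs_loop cooldown n m k s e < INT_MAX →
        m ≤ pvUpA (cooldown.take n.toNat) k (bs_loop cooldown n m k s e)) := by
  intro fuel
  induction fuel with
  | zero =>
    intro s e hfuel hs0 hse heM hlow hhigh
    have hse' : s = e := by omega
    rw [bs_loop, if_neg (by omega)]
    exact ⟨by omega, heM, fun t ht0 hte => hlow t ht0 (by omega), hhigh⟩
  | succ fuel ih =>
    intro s e hfuel hs0 hse heM hlow hhigh
    by_cases hlt : s < e
    · have hunf : bs_loop cooldown n m k s e =
          (if upgrade_possible cooldown (s + PySem.Int.floordiv (e - s) 2) n m k ≠ 0 then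
            bs_loop cooldown n m k s (s + PySem.Int.floordiv (e - s) 2)
          else bs_loop cooldown n m k (s + PySem.Int.floordiv (e - s) 2 + 1) e) := by
        rw [bs_loop]
        simp only [if_pos hlt]
      rw [hunf]
      have hfd : PySem.Int.floordiv (e - s) 2 = (e - s) / 2 :=
        PySem.Int.floordiv_eq_ediv_of_pos (by omega)
      set mid := s + PySem.Int.floordiv (e - s) 2 with hmid
      have hmid1 : s ≤ mid := by rw [hmid, hfd]; omega
      have hmid2 : mid < e := by rw [hmid, hfd]; omega
      rw [upgrade_possible_eq cooldown mid n m k hn]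
      by_cases hfeas : pvUpA (cooldown.take n.toNat) k mid ≥ m
      · rw [if_pos hfeas]
        simp only [ne_eq, one_ne_zero, not_false_eq_true, if_pos]
        exact ih s mid (by omega) hs0 (by omega) (by omega) hlow (fun _ => hfeas)
      · rw [if_neg hfeas]
        simp only [ne_eq, not_true_eq_false, if_false]
        refine ih (mid + 1) e (by omega) (by omega) (by omega) heM ?_ hhigh
        intro t ht0 htm
        by_cases hts : t < s
        · exact hlow t ht0 hts
        · have : pvUpA (cooldown.take n.toNat) k t ≤ pvUpA (cooldown.take n.toNat) k mid :=
            monoA _ t mid k hk (by omega)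
          omega
    · rw [bs_loop, if_neg hlt]
      have hse' : s = e := by omega
      exact ⟨by omega, heM, fun t ht0 hte => hlow t ht0 (by omega), hhigh⟩

-- what B's sweep returns
theorem scanB_spec (cooldown : List Int) (n m k : Int)
    (hn : n ≤ (cooldown.length : Int)) (hk : 0 < k) :
    ∀ C : List Int, C.Pairwise (· < ·) →
      (scanB cooldown n m k C ∈ C ∧
        m ≤ pvUpA (cooldown.take n.toNat) k (scanB cooldown n m k C) ∧
        ∀ c ∈ C, c < scanB cooldown n m k C → pvUpA (cooldown.take n.toNat) k c < m) ∨
      (scanB cooldown n m k C = 0 ∧ ∀ c ∈ C, pvUpA (cooldown.take n.toNat) k c < m) := by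
  intro C
  induction C with
  | nil => intro _; right; exact ⟨rfl, by simp⟩
  | cons c0 rest ih =>
    intro hpw
    rw [scanB]
    rw [ready_groups_eq cooldown n c0 k hn hk]
    by_cases hfeas : pvUpA (cooldown.take n.toNat) k c0 ≥ m
    · rw [if_pos hfeas]
      left
      refine ⟨List.mem_cons_self .., hfeas, ?_⟩
      intro c hc hcc
      rcases List.mem_cons.1 hc with h | h
      · omega
      · exfalso
        have := (List.pairwise_cons.1 hpw).1 c h
        omega
    · rw [if_neg hfeas]
      rcases ih (List.pairwise_cons.1 hpw).2 with ⟨hmem, hf, hall⟩ | ⟨hM, hall⟩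
      · left
        refine ⟨List.mem_cons_of_mem _ hmem, hf, ?_⟩
        intro c hc hcc
        rcases List.mem_cons.1 hc with h | h
        · subst h; omega
        · exact hall c h hcc
      · right
        refine ⟨hM, ?_⟩
        intro c hc
        rcases List.mem_cons.1 hc with h | h
        · subst h; omega
        · exact hall c h

-- ===== VERDICT (by name: the statement is the Claim_ definition above) =====
theorem min_cooldown_time_spec : Claim_equal_min_cooldown_time := by
  intro cooldown n m k hdom hpre
  unfold Spec_min_cooldown_time min_cooldown_time
  by_cases hg : m * k > n
  · unfold min_cooldown_time_alt
    rw [if_pos hg, if_pos hg]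
  · rcases hpre with hpre | ⟨hk1, hn, hbound⟩
    · exact absurd hpre hg
    have hk : 0 < k := by omega
    have hMpos : (0 : Int) ≤ INT_MAX := by norm_num [INT_MAX]
    set L := cooldown.take n.toNat with hL
    have hLbound : ∀ v ∈ L, v ≤ INT_MAX := by
      intro v hv
      have := hbound v hv
      norm_num [INT_MAX]
      omega
    -- the candidate event list
    set Cpos := PySem.List.sorted
        (PySem.Set.ofList
          (((PySem.List.pyRange 0 n 1).map (fun i => PySem.List.pyGetD cooldown i 0)).filter
            (fun v => decide (0 < v))))
        (fun x => x) false with hCpos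
    have hmapL : ((PySem.List.pyRange 0 n 1).map (fun i => PySem.List.pyGetD cooldown i 0)).filter
        (fun v => decide (0 < v)) = L.filter (fun v => decide (0 < v)) := by
      rw [map_range_take cooldown n hn]
    have hmemCpos : ∀ x : Int, x ∈ Cpos ↔ (x ∈ L ∧ 0 < x) := by
      intro x
      rw [hCpos, PySem.List.mem_sorted, hmapL]
      rw [PySem.Set.mem_ofList, List.mem_filter]
      simp
    have hCpw : Cpos.Pairwise (· < ·) := by
      rw [hCpos]; exact PySem.List.sorted_ofList_pairwise_lt _
    -- B's result is the sweep over 0 :: Cpos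
    have hBeq : min_cooldown_time_alt cooldown n m k = scanB cooldown n m k (0 :: Cpos) := by
      unfold min_cooldown_time_alt
      rw [if_neg hg]
      rw [scanB]
    set Call := (0 : Int) :: Cpos with hCall
    have hCallpw : Call.Pairwise (· < ·) := by
      rw [hCall]
      refine List.pairwise_cons.2 ⟨?_, hCpw⟩
      intro c hc
      exact ((hmemCpos c).1 hc).2
    have h0C : (0 : Int) ∈ Call := List.mem_cons_self ..
    have hCof : ∀ v ∈ L, 0 ≤ v → v ≤ INT_MAX → v ∈ Call := by
      intro v hv hv0 _
      rcases lt_or_eq_of_le hv0 with h | h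
      · exact List.mem_cons_of_mem _ ((hmemCpos v).2 ⟨hv, h⟩)
      · rw [← h]; exact h0C
    have hCbound : ∀ c ∈ Call, 0 ≤ c ∧ c ≤ INT_MAX := by
      intro c hc
      rcases List.mem_cons.1 hc with h | h
      · subst h; exact ⟨le_rfl, hMpos⟩
      · obtain ⟨hcL, hc0⟩ := (hmemCpos c).1 h
        exact ⟨by omega, hLbound c hcL⟩
    -- a feasible candidate exists: the maximum value (or 0)
    have hlenL : (L.length : Int) = max n 0 := by
      simp [hL]
      omega
    have hfeasT : ∀ t : Int, (∀ v ∈ L, v ≤ t) → m ≤ pvUpA L k t := by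
      intro t ht
      rw [pvUpA_all_le L t k hk ht, hlenL]
      rw [Int.le_ediv_iff_mul_le hk]
      omega
    set T := L.foldr max 0 with hT
    have hTfeas : m ≤ pvUpA L k T := hfeasT T (le_foldr_max L)
    have hTC : T ∈ Call := by
      by_cases hT0 : T = 0
      · rw [hT0]; exact h0C
      · rcases foldr_max_cases L with h | h
        · exact absurd h hT0
        · have : 0 < T := lt_of_le_of_ne (foldr_max_nonneg L) (Ne.symm hT0)
          exact List.mem_cons_of_mem _ ((hmemCpos T).2 ⟨h, this⟩)
    -- characterise B
    rcases scanB_spec cooldown n m k hn hk Call hCallpw with ⟨hmem, hf, hall⟩ | ⟨_, hall⟩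
    swap
    · exfalso
      have := hall T hTC
      rw [← hL] at this
      omega
    rw [← hL] at hf hall
    set rB := scanB cooldown n m k Call with hrB
    obtain ⟨hB0, hBM⟩ := hCbound rB hmem
    have hBlow : ∀ t, 0 ≤ t → t < rB → pvUpA L k t < m := by
      intro t ht0 htr
      apply noP L Call m k t h0C hCof ht0 (by omega)
      intro c hc hct
      exact hall c hc (by omega)
    -- characterise A
    obtain ⟨hA0, hAM, hAlow, hAhigh⟩ :=
      bs_spec cooldown n m k hn hk (INT_MAX - 0).toNat 0 INT_MAX le_rfl le_rfl hMpos le_rfl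
        (fun t ht0 hts => absurd (lt_of_le_of_lt ht0 hts) (lt_irrefl 0))
        (fun h => absurd h (lt_irrefl _))
    set rA := bs_loop cooldown n m k 0 INT_MAX with hrA
    rw [← hL] at hAlow hAhigh
    rw [if_neg hg, hBeq]
    rcases lt_trichotomy rA rB with hlt | heq | hgt
    · exfalso
      have h1 := hBlow rA hA0 hlt
      omega
    · exact heq
    · exfalso
      have h1 := hAlow rB hB0 hgt
      omega
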